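-- pv_equiv track=rewrite | github.com/GSA-TTS/FAC | backend/support/cog_over.py | calc_cfda_amounts
-- ===== SOURCE A (Python) =====
-- from collections import defaultdict
--
-- def calc_cfda_amounts(cfdas):
--     total_amount_agency = defaultdict(lambda: 0)
--     total_da_amount_agency = defaultdict(lambda: 0)
--     for cfda in cfdas:
--         agency = cfda[0][:2]
--         amount = cfda[1] or 0
--         direct = cfda[2]
--         total_amount_agency[agency] += amount
--         if direct == "Y":
--             total_da_amount_agency[agency] += amount
--     return (
--         prune_dict_to_max_values(total_amount_agency),
--         prune_dict_to_max_values(total_da_amount_agency),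
--     )
--
-- def prune_dict_to_max_values(data: dict):
--     """
--     prune_dict_to_max_values({"a": 5, "b": 10, "c": 10}) => {"b": 10, "c": 10}
--     """
--     if len(data) == 0:
--         return data
--
--     pruned_dict = {}
--     max_value = max(data.values())
--     for key, value in data.items():
--         if value == max_value:
--             pruned_dict[key] = value
--     return pruned_dict
-- ===== SOURCE B (Python) =====
-- def _leaders(pairs):
--     # pairs: list of (agency, amount). Returns dict of the max-total agencies.
--     if not pairs:
--         return {}
--     keys = list(dict.fromkeys(k for k, _ in pairs))
--     totals = [(k, sum(v for kk, v in pairs if kk == k)) for k in keys]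
--     ranked = sorted(totals, key=lambda kv: -kv[1])  # stable: ties keep first-seen order
--     best = ranked[0][1]
--     out = {}
--     for k, v in ranked:
--         if v != best:
--             break
--         out[k] = v
--     return out
--
--
-- def calc_cfda_amounts(cfdas):
--     return (
--         _leaders([(name[:2], amount or 0) for name, amount, direct in cfdas]),
--         _leaders([(name[:2], amount or 0) for name, amount, direct in cfdas if direct == "Y"]),
--     )
-- ===== Notes on version B (the rewrite author's own statement) =====
-- stated objective: alternative
-- what changed: Replaces the dict-accumulation group-by plus two-pass prune (max of values, then filter) by list comprehensions: dedup the agency keys in first-seen order, compute each agency's total by a per-key sum over the pair list, stable-sort the totals by descending value and take the leading run of ties as the winners.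
import Mathlib
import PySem

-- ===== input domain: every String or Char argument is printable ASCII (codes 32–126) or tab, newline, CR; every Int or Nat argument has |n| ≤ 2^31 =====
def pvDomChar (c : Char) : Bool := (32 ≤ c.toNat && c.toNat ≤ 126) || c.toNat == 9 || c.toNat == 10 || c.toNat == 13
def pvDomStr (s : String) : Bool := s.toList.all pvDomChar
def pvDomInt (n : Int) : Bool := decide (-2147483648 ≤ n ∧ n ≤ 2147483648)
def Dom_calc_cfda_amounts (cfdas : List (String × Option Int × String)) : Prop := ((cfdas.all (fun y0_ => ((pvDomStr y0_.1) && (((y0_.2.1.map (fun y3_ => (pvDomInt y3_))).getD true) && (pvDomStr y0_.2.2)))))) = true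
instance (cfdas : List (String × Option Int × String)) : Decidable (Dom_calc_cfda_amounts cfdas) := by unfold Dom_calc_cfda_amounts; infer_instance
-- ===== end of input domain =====

-- B drops A's dict-accumulation group-by and two-pass prune (max of values, then filter) in favour of
-- comprehensions: dedup the keys, a per-key sum over the pair list, a stable sort by descending total,
-- and the leading run of ties as winners (alternative decomposition, not claimed faster).

-- ===== PORT A =====
-- prune_dict_to_max_values: max of values, then filter the equal entries into a fresh dict
def pruneA (data : PySem.Dict String Int) : PySem.Dict String Int :=
  if data.size = 0 then data
  else
    -- max(data.values()); values is nonempty here, so max? is some and the default is never used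
    let max_value : Int := (PySem.List.max? data.values (fun v => v)).getD 0
    data.items.foldl
      (fun pruned kv => if kv.2 = max_value then pruned.insert kv.1 kv.2 else pruned)
      PySem.Dict.empty

def calc_cfda_amounts (cfdas : List (String × Option Int × String)) : (List (String × Int)) × (List (String × Int)) :=
  let st := cfdas.foldl
    (fun (st : PySem.Dict String Int × PySem.Dict String Int) cfda =>
      let agency := PySem.Str.slice cfda.1 none (some 2)
      let amount : Int := cfda.2.1.getD 0
      let t1 := st.1.modify agency 0 (· + amount)
      let t2 := if cfda.2.2 = "Y" then st.2.modify agency 0 (· + amount) else st.2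
      (t1, t2))
    (PySem.Dict.empty, PySem.Dict.empty)
  ((pruneA st.1).items, (pruneA st.2).items)

-- ===== PORT B =====
-- sum(v for kk, v in pairs if kk == k)
def sumForB (pairs : List (String × Int)) (k : String) : Int :=
  ((pairs.filter (fun q => decide (q.1 = k))).map Prod.snd).sum

-- [(k, sum(...)) for k in list(dict.fromkeys(k for k, _ in pairs))]
def totalsOfB (pairs : List (String × Int)) : List (String × Int) :=
  (PySem.List.dedup (pairs.map Prod.fst)).map (fun k => (k, sumForB pairs k))

-- the collection loop: 'for k, v in ranked: if v != best: break; out[k] = v'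
def outLoopB (best : Int) : List (String × Int) → PySem.Dict String Int → PySem.Dict String Int
  | [], out => out
  | kv :: t, out => if kv.2 ≠ best then out else outLoopB best t (out.insert kv.1 kv.2)

-- _leaders
def leadersB (pairs : List (String × Int)) : List (String × Int) :=
  match pairs with
  | [] => []
  | _ :: _ =>
    let totals := totalsOfB pairs
    let ranked := PySem.List.sorted totals (fun kv => -kv.2) false  -- stable sort, descending totals
    let best := (ranked.headD ("", 0)).2  -- ranked[0][1]; ranked ≠ [] since pairs ≠ []
    (outLoopB best ranked PySem.Dict.empty).items

-- (name[:2], amount or 0)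
def toPairB (c : String × Option Int × String) : String × Int :=
  (PySem.Str.slice c.1 none (some 2), c.2.1.getD 0)

def calc_cfda_amounts_alt (cfdas : List (String × Option Int × String)) : (List (String × Int)) × (List (String × Int)) :=
  (leadersB (cfdas.map toPairB),
   leadersB ((cfdas.filter (fun c => decide (c.2.2 = "Y"))).map toPairB))

-- ===== PRECONDITION & SPEC =====
def Spec_calc_cfda_amounts (cfdas : List (String × Option Int × String)) (out : (List (String × Int)) × (List (String × Int))) : Prop := out = calc_cfda_amounts_alt cfdas
instance (cfdas : List (String × Option Int × String)) (out : (List (String × Int)) × (List (String × Int))) : Decidable (Spec_calc_cfda_amounts cfdas out) := by unfold Spec_calc_cfda_amounts; infer_instance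

-- ===== CLAIM (what is proved, stated in full; the proofs are below) =====
def Claim_equal_calc_cfda_amounts : Prop := ∀ (cfdas : List (String × Option Int × String)), Dom_calc_cfda_amounts cfdas → Spec_calc_cfda_amounts cfdas (calc_cfda_amounts cfdas)

-- ===== LEMMAS AND PROOFS =====

-- A's group-by loop, as a fold over (key, amount) pairs
def aggD (pairs : List (String × Int)) : PySem.Dict String Int :=
  pairs.foldl (fun d p => d.modify p.1 0 (· + p.2)) PySem.Dict.empty

lemma find?_beq_of_mem {k : String} {l : List String} (h : k ∈ l) :
    l.find? (fun a => a == k) = some k := by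
  induction l with
  | nil => cases h
  | cons b t ih =>
    by_cases hb : b = k
    · subst hb; simp
    · have hk : k ∈ t := by
        rcases List.mem_cons.mp h with h | h
        · exact absurd h.symm hb
        · exact h
      rw [List.find?_cons_of_neg (by simp [hb])]
      exact ih hk

lemma find?_beq_of_not_mem {k : String} {l : List String} (h : k ∉ l) :
    l.find? (fun a => a == k) = none := by
  simp only [List.find?_eq_none, beq_iff_eq]
  intro x hx hxk
  exact h (hxk ▸ hx)

lemma getD_totals (pairs : List (String × Int)) (k : String)
    (h : k ∈ PySem.List.dedup (pairs.map Prod.fst)) :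
    (PySem.Dict.mk (totalsOfB pairs)).getD k 0 = sumForB pairs k := by
  simp only [PySem.Dict.getD, PySem.Dict.get?, totalsOfB, List.find?_map]
  have : ((PySem.List.dedup (pairs.map Prod.fst)).find?
      ((fun p => p.1 == k) ∘ fun k => (k, sumForB pairs k))) = some k := by
    simpa [Function.comp] using find?_beq_of_mem h
  rw [this]
  rfl

lemma contains_totals (pairs : List (String × Int)) (k : String) :
    (PySem.Dict.mk (totalsOfB pairs)).contains k
      = decide (k ∈ PySem.List.dedup (pairs.map Prod.fst)) := by
  by_cases h : k ∈ PySem.List.dedup (pairs.map Prod.fst)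
  · simp only [PySem.Dict.contains, totalsOfB, List.any_map, h, decide_true]
    rw [List.any_eq_true]
    exact ⟨k, h, by simp⟩
  · simp only [PySem.Dict.contains, totalsOfB, List.any_map, h, decide_false]
    rw [List.any_eq_false]
    intro x hx
    simp only [Function.comp, beq_iff_eq]
    intro hxk
    exact h (hxk ▸ hx)

lemma sumForB_append (pairs : List (String × Int)) (q : String × Int) (k : String) :
    sumForB (pairs ++ [q]) k = if q.1 = k then sumForB pairs k + q.2 else sumForB pairs k := by
  simp only [sumForB, List.filter_append]
  by_cases h : q.1 = k
  · simp [List.filter, h]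
  · simp [List.filter, h]

lemma dedup_append_singleton {α : Type} [BEq α] (xs : List α) (x : α) :
    PySem.List.dedup (xs ++ [x]) = PySem.Set.add (PySem.List.dedup xs) x := by
  simp only [PySem.List.dedup, PySem.Set.ofList_eq_foldl, List.foldl_append, List.foldl]

lemma sumForB_not_mem (pairs : List (String × Int)) (k : String)
    (h : k ∉ pairs.map Prod.fst) : sumForB pairs k = 0 := by
  have : pairs.filter (fun q => decide (q.1 = k)) = [] := by
    rw [List.filter_eq_nil_iff]
    intro q hq
    simp only [decide_eq_true_eq]
    intro hqk
    exact h (hqk ▸ List.mem_map_of_mem hq)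
  simp [sumForB, this]

-- lookup misses when the key is absent
lemma getD_totals_none (pairs : List (String × Int)) (k : String)
    (h : k ∉ PySem.List.dedup (pairs.map Prod.fst)) :
    (PySem.Dict.mk (totalsOfB pairs)).getD k 0 = 0 := by
  simp only [PySem.Dict.getD, PySem.Dict.get?, totalsOfB, List.find?_map]
  have : ((PySem.List.dedup (pairs.map Prod.fst)).find?
      ((fun p => p.1 == k) ∘ fun k => (k, sumForB pairs k))) = none := by
    simpa [Function.comp] using find?_beq_of_not_mem h
  rw [this]
  rfl

-- the group-by dict's items are exactly B's totals list
lemma aggD_items (pairs : List (String × Int)) : (aggD pairs).items = totalsOfB pairs := by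
  induction pairs using List.reverseRecOn with
  | nil => rfl
  | append_singleton ps q ih =>
    have hstep : aggD (ps ++ [q]) = (aggD ps).modify q.1 0 (· + q.2) := by
      simp [aggD, List.foldl_append]
    have hagg : aggD ps = PySem.Dict.mk (totalsOfB ps) := PySem.Dict.ext ih
    rw [hstep, hagg]
    simp only [PySem.Dict.modify, PySem.Dict.insert]
    by_cases hmem : q.1 ∈ PySem.List.dedup (ps.map Prod.fst)
    · rw [contains_totals, if_pos (by simpa using hmem), getD_totals ps q.1 hmem]
      show List.map _ (totalsOfB ps) = totalsOfB (ps ++ [q])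
      have hkeys : PySem.List.dedup ((ps ++ [q]).map Prod.fst)
          = PySem.List.dedup (ps.map Prod.fst) := by
        rw [List.map_append, List.map_cons, List.map_nil, dedup_append_singleton,
          PySem.Set.add]
        rw [if_pos]
        show List.contains _ _ = true
        exact List.contains_iff_mem.mpr hmem
      simp only [totalsOfB, hkeys, List.map_map]
      apply List.map_congr_left
      intro a _
      simp only [Function.comp, beq_iff_eq, sumForB_append]
      by_cases ha : a = q.1
      · subst ha; simp
      · rw [if_neg ha, if_neg (fun h => ha h.symm)]
    · rw [contains_totals, if_neg (by simpa using hmem), getD_totals_none]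
      · show totalsOfB ps ++ [(q.1, 0 + q.2)] = totalsOfB (ps ++ [q])
        have hkeys : PySem.List.dedup ((ps ++ [q]).map Prod.fst)
            = PySem.List.dedup (ps.map Prod.fst) ++ [q.1] := by
          rw [List.map_append, List.map_cons, List.map_nil, dedup_append_singleton,
            PySem.Set.add]
          rw [if_neg]
          show ¬ List.contains _ _ = true
          simpa [List.contains_iff_mem] using hmem
        have hq1 : q.1 ∉ ps.map Prod.fst := by
          simpa [PySem.List.mem_dedup] using hmem
        have hR : totalsOfB (ps ++ [q])
            = (PySem.List.dedup (ps.map Prod.fst)).map (fun k => (k, sumForB (ps ++ [q]) k))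
              ++ [(q.1, sumForB (ps ++ [q]) q.1)] := by
          rw [totalsOfB, hkeys]; simp
        rw [hR]
        congr 1
        · apply List.map_congr_left
          intro a ha
          rw [sumForB_append, if_neg]
          intro h
          exact hmem (h ▸ ha)
        · rw [sumForB_append, if_pos rfl, sumForB_not_mem ps q.1 hq1]
      · exact hmem

-- insertBy walks past a prefix it does not sort before
lemma insertBy_skip (before : String × Int → String × Int → Bool) (x : String × Int)
    (F S : List (String × Int)) (h : ∀ y ∈ F, before x y = false) :
    PySem.List.insertBy before x (F ++ S) = F ++ PySem.List.insertBy before x S := by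
  induction F with
  | nil => rfl
  | cons y t ih =>
    have hy : before x y = false := h y (by simp)
    rw [List.cons_append]
    simp only [PySem.List.insertBy, hy, Bool.false_eq_true, if_false]
    rw [ih (fun z hz => h z (by simp [hz])), List.cons_append]

-- insertBy lands at the head when it sorts before everything
lemma insertBy_front (before : String × Int → String × Int → Bool) (x : String × Int)
    (S : List (String × Int)) (h : ∀ y ∈ S, before x y = true) :
    PySem.List.insertBy before x S = x :: S := by
  cases S with
  | nil => rfl
  | cons y t => simp [PySem.List.insertBy, h y (by simp)]

-- stability of the descending sort at the maximum: the max-valued entries lead, in input order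
lemma sorted_split (l : List (String × Int)) (m : Int) (h : ∀ x ∈ l, x.2 ≤ m) :
    PySem.List.sorted l (fun kv => -kv.2) false
      = l.filter (fun kv => decide (kv.2 = m))
        ++ PySem.List.sorted (l.filter (fun kv => decide (kv.2 ≠ m))) (fun kv => -kv.2) false := by
  induction l using List.reverseRecOn with
  | nil => rfl
  | append_singleton t x ih =>
    have ht : ∀ y ∈ t, y.2 ≤ m := fun y hy => h y (by simp [hy])
    have hx : x.2 ≤ m := h x (by simp)
    have hsa : ∀ (zs : List (String × Int)),
        PySem.List.sorted (zs ++ [x]) (fun kv => -kv.2) false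
          = PySem.List.insertBy (fun a b => decide ((-a.2 : Int) < -b.2)) x
              (PySem.List.sorted zs (fun kv => -kv.2) false) := by
      intro zs
      rw [PySem.List.sorted_eq_foldl_insertBy, PySem.List.sorted_eq_foldl_insertBy,
        List.foldl_append]
      rfl
    rw [hsa, ih ht, List.filter_append, List.filter_append]
    by_cases hxm : x.2 = m
    · have hF : ∀ y ∈ t.filter (fun kv => decide (kv.2 = m)),
          (fun (a b : String × Int) => decide ((-a.2 : Int) < -b.2)) x y = false := by
        intro y hy
        have hym : y.2 = m := by simpa using (List.mem_filter.mp hy).2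
        simp [hym, hxm]
      have hS : ∀ y ∈ PySem.List.sorted (t.filter (fun kv => decide (kv.2 ≠ m)))
            (fun kv => -kv.2) false,
          (fun (a b : String × Int) => decide ((-a.2 : Int) < -b.2)) x y = true := by
        intro y hy
        have hy' := List.mem_filter.mp ((PySem.List.mem_sorted _ _ _ y).mp hy)
        have h1 : y.2 ≤ m := ht y hy'.1
        have h2 : y.2 ≠ m := by simpa using hy'.2
        have : y.2 < x.2 := by rw [hxm]; exact lt_of_le_of_ne h1 h2
        simp only [decide_eq_true_eq]
        omega
      rw [insertBy_skip _ _ _ _ hF, insertBy_front _ _ _ hS]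
      simp [List.filter, hxm]
    · have hF : ∀ y ∈ t.filter (fun kv => decide (kv.2 = m)),
          (fun (a b : String × Int) => decide ((-a.2 : Int) < -b.2)) x y = false := by
        intro y hy
        have hym : y.2 = m := by simpa using (List.mem_filter.mp hy).2
        have : x.2 < m ∨ x.2 = m := lt_or_eq_of_le hx
        have hlt : x.2 < m := this.resolve_right hxm
        simp only [decide_eq_false_iff_not, hym]
        omega
      rw [insertBy_skip _ _ _ _ hF]
      rw [show List.filter (fun kv => decide (kv.2 = m)) [x] = [] by simp [List.filter, hxm]]
      rw [show List.filter (fun kv => decide (kv.2 ≠ m)) [x] = [x] by simp [List.filter, hxm]]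
      rw [hsa, List.append_nil]

-- a key not yet inserted is absent from the accumulator
lemma fresh_of_nodup (acc : PySem.Dict String Int) (kv : String × Int) (t : List (String × Int))
    (h : ((acc.items ++ kv :: t).map Prod.fst).Nodup) : acc.contains kv.1 = false := by
  rw [PySem.Dict.contains, List.any_eq_false]
  intro p hp
  simp only [beq_iff_eq]
  intro hpk
  rw [List.map_append] at h
  exact List.disjoint_of_nodup_append h (List.mem_map_of_mem hp) (by rw [hpk]; simp)

-- A's filter loop over items with pairwise-fresh keys appends exactly the max-valued entries
lemma foldl_insert_filter (m : Int) (l : List (String × Int)) (acc : PySem.Dict String Int)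
    (h : ((acc.items ++ l).map Prod.fst).Nodup) :
    (l.foldl (fun pruned kv => if kv.2 = m then pruned.insert kv.1 kv.2 else pruned) acc).items
      = acc.items ++ l.filter (fun kv => decide (kv.2 = m)) := by
  induction l generalizing acc with
  | nil => simp
  | cons kv t ih =>
    have hfresh : acc.contains kv.1 = false := fresh_of_nodup acc kv t h
    rw [List.foldl_cons]
    by_cases hm : kv.2 = m
    · rw [if_pos hm]
      have hins : (acc.insert kv.1 kv.2).items = acc.items ++ [kv] := by
        rw [PySem.Dict.insert, if_neg (by simp [hfresh])]
      have h' : (((acc.insert kv.1 kv.2).items ++ t).map Prod.fst).Nodup := by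
        rw [hins, List.append_assoc]
        simpa using h
      rw [ih _ h', hins, List.append_assoc]
      simp [List.filter, hm]
    · rw [if_neg hm]
      have h' : ((acc.items ++ t).map Prod.fst).Nodup := by
        refine List.Nodup.sublist ?_ h
        exact (List.Sublist.append_left (List.sublist_cons_self kv t) acc.items).map Prod.fst
      rw [ih _ h']
      simp [List.filter, hm]

-- B's collection loop consumes exactly the leading run of best-valued entries
lemma outLoop_run (m : Int) (F S : List (String × Int)) (acc : PySem.Dict String Int)
    (hF : ∀ y ∈ F, y.2 = m) (hS : ∀ y ∈ S, y.2 ≠ m)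
    (h : ((acc.items ++ F).map Prod.fst).Nodup) :
    (outLoopB m (F ++ S) acc).items = acc.items ++ F := by
  induction F generalizing acc with
  | nil =>
    cases S with
    | nil => simp [outLoopB]
    | cons y t =>
      rw [List.nil_append, outLoopB, if_pos (hS y (by simp))]
      simp
  | cons kv t ih =>
    have hfresh : acc.contains kv.1 = false := fresh_of_nodup acc kv t h
    have hkv : kv.2 = m := hF kv (by simp)
    rw [List.cons_append, outLoopB, if_neg (by simp [hkv])]
    have hins : (acc.insert kv.1 kv.2).items = acc.items ++ [kv] := by
      rw [PySem.Dict.insert, if_neg (by simp [hfresh])]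
    have h' : (((acc.insert kv.1 kv.2).items ++ t).map Prod.fst).Nodup := by
      rw [hins, List.append_assoc]
      simpa using h
    rw [ih _ (fun y hy => hF y (by simp [hy])) h', hins, List.append_assoc,
      List.singleton_append]

-- the totals list has pairwise-distinct keys
lemma totals_keys_nodup (pairs : List (String × Int)) :
    ((totalsOfB pairs).map Prod.fst).Nodup := by
  rw [totalsOfB, List.map_map,
    show (Prod.fst ∘ fun k => (k, sumForB pairs k)) = id from rfl, List.map_id]
  exact PySem.List.nodup_dedup (pairs.map Prod.fst)

-- unfolding B's pipeline on a nonempty pair list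
lemma leadersB_ne_nil (pairs : List (String × Int)) (h : pairs ≠ []) :
    leadersB pairs =
      (outLoopB ((PySem.List.sorted (totalsOfB pairs) (fun kv => -kv.2) false).headD ("", 0)).2
        (PySem.List.sorted (totalsOfB pairs) (fun kv => -kv.2) false) PySem.Dict.empty).items := by
  cases pairs with
  | nil => exact absurd rfl h
  | cons p t => rfl

-- core: prune(group_by(pairs)) and B's dedup/sum/sort/run pipeline agree
lemma core_eq (pairs : List (String × Int)) :
    (pruneA (aggD pairs)).items = leadersB pairs := by
  cases hp : pairs with
  | nil => rfl
  | cons p0 t0 =>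
    rw [← hp]
    have hne : pairs ≠ [] := by simp [hp]
    have hitems : (aggD pairs).items = totalsOfB pairs := aggD_items pairs
    have hdict : aggD pairs = PySem.Dict.mk (totalsOfB pairs) := PySem.Dict.ext hitems
    have hkeyne : pairs.map Prod.fst ≠ [] := by simp [hp]
    have htne : totalsOfB pairs ≠ [] := by
      rw [totalsOfB]
      intro hcontra
      rcases List.exists_mem_of_ne_nil _ hkeyne with ⟨k, hk⟩
      have : k ∈ PySem.List.dedup (pairs.map Prod.fst) := (PySem.List.mem_dedup _ _).mpr hk
      rw [List.map_eq_nil_iff.mp hcontra] at this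
      cases this
    rcases hl : totalsOfB pairs with _ | ⟨a, rest⟩
    · exact absurd hl htne
    have hvals : (PySem.Dict.mk (totalsOfB pairs)).values = a.2 :: rest.map Prod.snd := by
      show (totalsOfB pairs).map Prod.snd = _
      rw [hl, List.map_cons]
    set m : Int := List.foldl max a.2 (rest.map Prod.snd) with hm
    have hmax : (PySem.List.max? (PySem.Dict.mk (totalsOfB pairs)).values (fun v => v)).getD 0 = m := by
      rw [hvals, PySem.List.max?_id_cons]
      rfl
    have hub : ∀ x ∈ totalsOfB pairs, x.2 ≤ m := by
      intro x hx
      rw [hl] at hx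
      rcases List.mem_cons.mp hx with hx | hx
      · rw [hx]; exact (PySem.List.le_foldl_max _ _).1
      · exact (PySem.List.le_foldl_max (rest.map Prod.snd) a.2).2 x.2 (List.mem_map_of_mem hx)
    have hattained : ∃ x ∈ totalsOfB pairs, x.2 = m := by
      rcases PySem.List.foldl_max_mem (rest.map Prod.snd) a.2 with hc | hc
      · exact ⟨a, by rw [hl]; simp, hc.symm⟩
      · rcases List.mem_map.mp hc with ⟨x, hx, hxm⟩
        exact ⟨x, by rw [hl]; simp [hx], hxm⟩
    have hnodup := totals_keys_nodup pairs
    -- A's side: the filtered items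
    have hsz : ¬ (aggD pairs).size = 0 := by
      show ¬ (aggD pairs).items.length = 0
      rw [hitems, hl]
      simp
    have hA : (pruneA (aggD pairs)).items
        = (totalsOfB pairs).filter (fun kv => decide (kv.2 = m)) := by
      rw [pruneA, if_neg hsz, hdict, hmax]
      rw [foldl_insert_filter m (totalsOfB pairs) PySem.Dict.empty (by simpa using hnodup)]
      rfl
    -- B's side: split the sort, read off the best, run the collection loop
    have hsplit := sorted_split (totalsOfB pairs) m hub
    set F := (totalsOfB pairs).filter (fun kv => decide (kv.2 = m)) with hFdef
    set S := PySem.List.sorted ((totalsOfB pairs).filter (fun kv => decide (kv.2 ≠ m)))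
        (fun kv => -kv.2) false with hSdef
    have hFne : F ≠ [] := by
      rcases hattained with ⟨x, hx1, hx2⟩
      exact List.ne_nil_of_mem (List.mem_filter.mpr ⟨hx1, by simp [hx2]⟩)
    have hbest : ((F ++ S).headD ("", 0)).2 = m := by
      rcases hFc : F with _ | ⟨c, Ft⟩
      · exact absurd hFc hFne
      have hcF : c ∈ F := by rw [hFc]; simp
      have hc : c.2 = m := by simpa using (List.mem_filter.mp hcF).2
      simpa using hc
    have hFa : ∀ y ∈ F, y.2 = m := by
      intro y hy
      simpa using (List.mem_filter.mp hy).2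
    have hSa : ∀ y ∈ S, y.2 ≠ m := by
      intro y hy
      have hy' := List.mem_filter.mp ((PySem.List.mem_sorted _ _ _ y).mp hy)
      simpa using hy'.2
    have hFnd : ((PySem.Dict.empty.items ++ F).map Prod.fst).Nodup := by
      rw [show PySem.Dict.empty.items = ([] : List (String × Int)) from rfl, List.nil_append]
      exact List.Nodup.sublist (List.Sublist.map Prod.fst List.filter_sublist) hnodup
    rw [hA, leadersB_ne_nil pairs hne, hsplit, hbest,
      outLoop_run m F S PySem.Dict.empty hFa hSa hFnd]
    rfl

-- ===== VERDICT (by name: the statement is the Claim_ definition above) =====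
theorem calc_cfda_amounts_spec : Claim_equal_calc_cfda_amounts := by
  intro cfdas _
  unfold Spec_calc_cfda_amounts
  show calc_cfda_amounts cfdas = calc_cfda_amounts_alt cfdas
  unfold calc_cfda_amounts calc_cfda_amounts_alt
  have hpair : (fun (st : PySem.Dict String Int × PySem.Dict String Int) (cfda : String × Option Int × String) =>
      let agency := PySem.Str.slice cfda.1 none (some 2)
      let amount : Int := cfda.2.1.getD 0
      let t1 := st.1.modify agency 0 (· + amount)
      let t2 := if cfda.2.2 = "Y" then st.2.modify agency 0 (· + amount) else st.2
      (t1, t2))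
    = (fun st cfda =>
        ((fun (d : PySem.Dict String Int) (c : String × Option Int × String) =>
            d.modify (PySem.Str.slice c.1 none (some 2)) 0 (· + c.2.1.getD 0)) st.1 cfda,
         (fun (d : PySem.Dict String Int) (c : String × Option Int × String) =>
            if c.2.2 = "Y" then d.modify (PySem.Str.slice c.1 none (some 2)) 0 (· + c.2.1.getD 0) else d) st.2 cfda)) := rfl
  rw [hpair, PySem.List.foldl_prod_mk
    (f := fun (d : PySem.Dict String Int) (c : String × Option Int × String) =>
        d.modify (PySem.Str.slice c.1 none (some 2)) 0 (· + c.2.1.getD 0))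
    (g := fun (d : PySem.Dict String Int) (c : String × Option Int × String) =>
        if c.2.2 = "Y" then d.modify (PySem.Str.slice c.1 none (some 2)) 0 (· + c.2.1.getD 0) else d)]
  have h1 : cfdas.foldl (fun (d : PySem.Dict String Int) c =>
        d.modify (PySem.Str.slice c.1 none (some 2)) 0 (· + c.2.1.getD 0)) PySem.Dict.empty
      = aggD (cfdas.map toPairB) := by
    rw [aggD, List.foldl_map]
    rfl
  have h2 : cfdas.foldl (fun (d : PySem.Dict String Int) c =>
        if c.2.2 = "Y" then d.modify (PySem.Str.slice c.1 none (some 2)) 0 (· + c.2.1.getD 0) else d) PySem.Dict.empty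
      = aggD ((cfdas.filter (fun c => decide (c.2.2 = "Y"))).map toPairB) := by
    rw [PySem.List.foldl_ite_eq_foldl_filter (p := fun c => c.2.2 = "Y")
        (f := fun (d : PySem.Dict String Int) c =>
          d.modify (PySem.Str.slice c.1 none (some 2)) 0 (· + c.2.1.getD 0)) cfdas PySem.Dict.empty,
      aggD, List.foldl_map]
    rfl
  rw [h1, h2]
  exact Prod.ext (core_eq _) (core_eq _)
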